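-- pv_equiv track=rewrite | github.com/yieldthought/mpiptop | mpiptop.py | invert_stack_lines
-- ===== SOURCE A (Python) =====
-- from typing import Dict, Iterable, List, Optional, Sequence, Tuple
--
-- def invert_stack_lines(lines: List[str]) -> List[str]:
--     output: List[str] = []
--     stack_block: List[str] = []
--     for line in lines:
--         if line.startswith("  "):
--             stack_block.append(line)
--             continue
--         if stack_block:
--             output.extend(reversed(stack_block))
--             stack_block = []
--         output.append(line)
--     if stack_block:
--         output.extend(reversed(stack_block))
--     return output
-- ===== SOURCE B (Python) =====
-- def _run_starts(ind):
--     # starts[i] = index where the maximal indented run containing i begins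
--     # (i itself when line i is not indented)
--     starts = []
--     for i in range(len(ind)):
--         starts.append(starts[-1] if ind[i] and i > 0 and ind[i - 1] else i)
--     return starts
--
--
-- def invert_stack_lines(lines):
--     ind = [l.startswith("  ") for l in lines]
--     start = _run_starts(ind)
--     rstart = _run_starts(ind[::-1])
--     n = len(lines)
--     # mirror each index inside its indented run: output[i] = lines[run_start + run_end - i]
--     return [lines[start[i] + (n - 1 - rstart[n - 1 - i]) - i] for i in range(n)]
-- ===== Notes on version B (the rewrite author's own statement) =====
-- stated objective: alternative
-- what changed: Replaces A's buffer-and-flush accumulator loop by an index-permutation computation: two scans compute each position's run-start (forward and on the reversed indentation mask), and the output is built by mirroring each index inside its indented run (output[i] = lines[run_start + run_end - i]); no block list is ever built or reversed.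
import Mathlib
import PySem

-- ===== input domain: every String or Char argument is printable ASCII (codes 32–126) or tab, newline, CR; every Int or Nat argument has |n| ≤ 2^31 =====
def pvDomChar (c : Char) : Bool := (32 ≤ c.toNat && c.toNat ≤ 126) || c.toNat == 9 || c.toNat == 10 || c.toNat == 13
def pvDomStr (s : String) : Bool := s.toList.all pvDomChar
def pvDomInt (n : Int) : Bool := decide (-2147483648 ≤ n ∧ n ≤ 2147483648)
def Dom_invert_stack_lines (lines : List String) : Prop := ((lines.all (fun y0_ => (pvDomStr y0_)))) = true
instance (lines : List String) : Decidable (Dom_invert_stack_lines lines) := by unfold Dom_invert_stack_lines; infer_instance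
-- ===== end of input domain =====

-- B replaces A's buffer-and-flush loop by an index permutation: two run-start scans (forward,
-- and on the reversed mask) and output[i] = lines[run_start + run_end - i] (alternative; same O(n)).

-- ===== PORT A =====
-- the for-loop over `lines` with state (output, stack_block), plus the final flush
def invASLoop (output stack : List String) : List String → List String
  | [] => if stack = [] then output else output ++ stack.reverse
  | line :: rest =>
      if PySem.Str.startswith line "  " then
        invASLoop output (stack ++ [line]) rest
      else
        invASLoop ((if stack = [] then output else output ++ stack.reverse) ++ [line]) [] rest

def invert_stack_lines (lines : List String) : List String :=
  invASLoop [] [] lines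

-- ===== PORT B =====
-- _run_starts: starts.append(starts[-1] if ind[i] and i > 0 and ind[i-1] else i) over range(len(ind))
-- (starts[-1] is only read when i > 0, so getLastD's default is never used)
def runStartsISL (ind : List Bool) : List Nat :=
  (List.range ind.length).foldl
    (fun acc i =>
      acc ++ [if ind.getD i false && decide (0 < i) && ind.getD (i - 1) false
              then acc.getLastD 0 else i]) []

-- all index values provably stay inside [0, n), so Nat subtraction and getD's default
-- are never exercised and match Python's int arithmetic / list indexing exactly
def invert_stack_lines_alt (lines : List String) : List String :=
  let ind := lines.map (fun l => PySem.Str.startswith l "  ")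
  let start := runStartsISL ind
  let rstart := runStartsISL ind.reverse
  let n := lines.length
  (List.range n).map (fun i =>
    lines.getD (start.getD i 0 + (n - 1 - rstart.getD (n - 1 - i) 0) - i) "")

-- ===== PRECONDITION & SPEC =====
def Spec_invert_stack_lines (lines : List String) (out : List String) : Prop := out = invert_stack_lines_alt lines
instance (lines : List String) (out : List String) : Decidable (Spec_invert_stack_lines lines out) := by unfold Spec_invert_stack_lines; infer_instance

-- ===== CLAIM (what is proved, stated in full; the proofs are below) =====
def Claim_equal_invert_stack_lines : Prop := ∀ (lines : List String), Dom_invert_stack_lines lines → Spec_invert_stack_lines lines (invert_stack_lines lines)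

-- ===== LEMMAS AND PROOFS =====

-- ---- run decomposition used by the proof (not by either port) ----
-- split off the maximal prefix run whose key (startswith "  ") equals k
def takeRunISL (k : Bool) : List String → List String × List String
  | [] => ([], [])
  | l :: rest =>
      if PySem.Str.startswith l "  " = k then
        let p := takeRunISL k rest
        (l :: p.1, p.2)
      else ([], l :: rest)

theorem takeRunISL_snd_len (k : Bool) (ls : List String) :
    (takeRunISL k ls).2.length ≤ ls.length := by
  induction ls with
  | nil => simp [takeRunISL]
  | cons l rest ih =>
      simp only [takeRunISL]
      split
      · exact Nat.le_succ_of_le ih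
      · simp

-- the list of (key, run) pairs, runs maximal and consecutive
def groupRunsISL : List String → List (Bool × List String)
  | [] => []
  | l :: rest =>
      let k := PySem.Str.startswith l "  "
      let p := takeRunISL k rest
      (k, l :: p.1) :: groupRunsISL p.2
termination_by ls => ls.length
decreasing_by
  exact Nat.lt_succ_of_le (takeRunISL_snd_len _ rest)

-- ---- A-side: A's loop equals the run-by-run flatMap ----
theorem invASLoop_out (ls : List String) : ∀ out stack : List String,
    invASLoop out stack ls = out ++ invASLoop [] stack ls := by
  induction ls with
  | nil =>
      intro out stack
      by_cases h : stack = [] <;> simp [invASLoop, h]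
  | cons l rest ih =>
      intro out stack
      by_cases hk : PySem.Str.startswith l "  " = true
      · simp only [invASLoop, hk, if_true]
        exact ih out (stack ++ [l])
      · rw [Bool.not_eq_true] at hk
        simp only [invASLoop, hk, Bool.false_eq_true, if_false]
        rw [ih ((if stack = [] then out else out ++ stack.reverse) ++ [l]) [],
            ih ((if stack = [] then ([] : List String) else [] ++ stack.reverse) ++ [l]) []]
        by_cases h : stack = [] <;> simp [h]

theorem invASLoop_trueRun (ls : List String) : ∀ stack : List String,
    invASLoop [] stack ls =
      (stack ++ (takeRunISL true ls).1).reverse ++ invASLoop [] [] (takeRunISL true ls).2 := by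
  induction ls with
  | nil =>
      intro stack
      by_cases h : stack = [] <;> simp [invASLoop, takeRunISL, h]
  | cons l rest ih =>
      intro stack
      by_cases hk : PySem.Str.startswith l "  " = true
      · have hk' : PySem.Chars.startswith l.toList [' ', ' '] = true := by simpa using hk
        have ht : takeRunISL true (l :: rest) =
            (l :: (takeRunISL true rest).1, (takeRunISL true rest).2) := by
          simp [takeRunISL, hk']
        simp only [invASLoop, hk, if_true, ht]
        rw [ih (stack ++ [l])]
        simp
      · rw [Bool.not_eq_true] at hk
        have hk' : PySem.Chars.startswith l.toList [' ', ' '] = false := by simpa using hk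
        have ht : takeRunISL true (l :: rest) = ([], l :: rest) := by
          simp [takeRunISL, hk']
        rw [ht]
        simp only [invASLoop, hk, Bool.false_eq_true, if_false]
        rw [invASLoop_out]
        by_cases h : stack = [] <;>
          simp [h, invASLoop_out rest [l], List.append_assoc]

theorem invASLoop_falseRun (ls : List String) :
    invASLoop [] [] ls =
      (takeRunISL false ls).1 ++ invASLoop [] [] (takeRunISL false ls).2 := by
  induction ls with
  | nil => simp [takeRunISL]
  | cons l rest ih =>
      by_cases hk : PySem.Str.startswith l "  " = true
      · have hk' : PySem.Chars.startswith l.toList [' ', ' '] = true := by simpa using hk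
        simp [takeRunISL, hk']
      · rw [Bool.not_eq_true] at hk
        have hk' : PySem.Chars.startswith l.toList [' ', ' '] = false := by simpa using hk
        have ht : takeRunISL false (l :: rest) =
            (l :: (takeRunISL false rest).1, (takeRunISL false rest).2) := by
          simp [takeRunISL, hk']
        rw [ht]
        rw [show invASLoop [] [] (l :: rest) = invASLoop [l] [] rest by
          simp [invASLoop, hk']]
        rw [invASLoop_out, ih]
        simp

theorem invASLoop_eq_runs (n : Nat) : ∀ ls : List String, ls.length ≤ n →
    invASLoop [] [] ls =
      (groupRunsISL ls).flatMap (fun g => if g.1 then g.2.reverse else g.2) := by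
  induction n with
  | zero =>
      intro ls h
      have : ls = [] := List.eq_nil_of_length_eq_zero (Nat.le_zero.mp h)
      simp [this, invASLoop, groupRunsISL]
  | succ n ih =>
      intro ls h
      cases ls with
      | nil => simp [invASLoop, groupRunsISL]
      | cons l rest =>
          simp only [List.length_cons, Nat.succ_le_succ_iff] at h
          by_cases hk : PySem.Str.startswith l "  " = true
          · have hk' : PySem.Chars.startswith l.toList [' ', ' '] = true := by simpa using hk
            have ht : takeRunISL true (l :: rest) =
                (l :: (takeRunISL true rest).1, (takeRunISL true rest).2) := by
              simp [takeRunISL, hk']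
            have hg : groupRunsISL (l :: rest) =
                (true, l :: (takeRunISL true rest).1) ::
                  groupRunsISL (takeRunISL true rest).2 := by
              simp [groupRunsISL, hk']
            rw [invASLoop_trueRun (l :: rest) [], ht, hg]
            simp only [List.flatMap_cons]
            rw [ih _ (le_trans (takeRunISL_snd_len _ rest) h)]
            simp
          · rw [Bool.not_eq_true] at hk
            have hk' : PySem.Chars.startswith l.toList [' ', ' '] = false := by simpa using hk
            have hg : groupRunsISL (l :: rest) =
                (false, l :: (takeRunISL false rest).1) ::
                  groupRunsISL (takeRunISL false rest).2 := by
              simp [groupRunsISL, hk']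
            rw [show invASLoop [] [] (l :: rest) = invASLoop [l] [] rest by
              simp [invASLoop, hk']]
            rw [invASLoop_out, invASLoop_falseRun rest, hg]
            simp only [List.flatMap_cons]
            rw [ih _ (le_trans (takeRunISL_snd_len _ rest) h)]
            simp

-- ---- B-side: properties of runStartsISL ----
theorem getLastD_eq_getD_ISL (l : List Nat) (d : Nat) :
    l.getLastD d = l.getD (l.length - 1) d := by
  simp [List.getLastD_eq_getLast?, List.getLast?_eq_getElem?, List.getD_eq_getElem?_getD]

theorem runStartsISL_snoc (ind : List Bool) (b : Bool) :
    runStartsISL (ind ++ [b]) =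
      runStartsISL ind ++
        [if b && decide (0 < ind.length) && ind.getD (ind.length - 1) false
         then (runStartsISL ind).getLastD 0 else ind.length] := by
  unfold runStartsISL
  have hlen : (ind ++ [b]).length = ind.length + 1 := by simp
  rw [hlen, List.range_succ, List.foldl_append]
  have hcongr :
      (List.range ind.length).foldl
        (fun acc i =>
          acc ++ [if (ind ++ [b]).getD i false && decide (0 < i) && (ind ++ [b]).getD (i - 1) false
                  then acc.getLastD 0 else i]) [] =
      (List.range ind.length).foldl
        (fun acc i =>
          acc ++ [if ind.getD i false && decide (0 < i) && ind.getD (i - 1) false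
                  then acc.getLastD 0 else i]) [] := by
    apply PySem.List.foldl_congr_mem
    intro acc i hi
    have hi' : i < ind.length := List.mem_range.mp hi
    rw [List.getD_append _ _ _ _ hi',
        List.getD_append _ _ _ _ (show i - 1 < ind.length by omega)]
  rw [hcongr]
  simp only [List.foldl_cons, List.foldl_nil]
  congr 1
  have h1 : (ind ++ [b]).getD ind.length false = b := by
    rw [List.getD_append_right _ _ _ _ le_rfl]; simp
  rw [h1]
  by_cases hn : 0 < ind.length
  · rw [List.getD_append _ _ _ _ (by omega : ind.length - 1 < ind.length)]
  · have h0 : ind.length = 0 := by omega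
    simp [h0]

theorem runStartsISL_length (ind : List Bool) : (runStartsISL ind).length = ind.length := by
  induction ind using List.reverseRecOn with
  | nil => simp [runStartsISL]
  | append_singleton l b ih => rw [runStartsISL_snoc]; simp [ih]

theorem runStartsISL_getD_le (ind : List Bool) (i : Nat) :
    (runStartsISL ind).getD i 0 ≤ i := by
  induction ind using List.reverseRecOn generalizing i with
  | nil => simp [runStartsISL]
  | append_singleton l b ih =>
      rw [runStartsISL_snoc]
      rcases lt_trichotomy i (runStartsISL l).length with h | h | h
      · rw [List.getD_append _ _ _ _ h]; exact ih i
      · rw [List.getD_append_right _ _ _ _ (le_of_eq h.symm), h]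
        simp only [Nat.sub_self, List.getD_cons_zero]
        have hlen := runStartsISL_length l
        split
        · have h2 := ih ((runStartsISL l).length - 1)
          rw [getLastD_eq_getD_ISL]
          omega
        · omega
      · rw [List.getD_append_right _ _ _ _ (le_of_lt h)]
        have : 1 ≤ i - (runStartsISL l).length := by omega
        rw [List.getD_eq_getElem?_getD]
        rw [List.getElem?_eq_none (by simpa using this)]
        simp

theorem runStartsISL_append (p q : List Bool)
    (hb : p.getD (p.length - 1) false = false ∨ q.getD 0 false = false) :
    runStartsISL (p ++ q) = runStartsISL p ++ (runStartsISL q).map (· + p.length) := by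
  induction q using List.reverseRecOn with
  | nil => simp [runStartsISL]
  | append_singleton q b ih =>
      rw [show p ++ (q ++ [b]) = (p ++ q) ++ [b] by simp, runStartsISL_snoc]
      rcases List.eq_nil_or_concat' q with hq | ⟨q', b', hq⟩
      · subst hq
        have hrsb : runStartsISL [b] = [0] := by
          cases b <;> simp [runStartsISL, List.range_succ]
        simp only [List.nil_append, List.append_nil] at *
        rw [hrsb]
        have hcond : (b && decide (0 < p.length) && p.getD (p.length - 1) false) = false := by
          rcases hb with h | h
          · simp only [List.getD_eq_getElem?_getD] at h
            simp [h]
          · simp only [List.getD_cons_zero] at h; simp [h]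
        rw [hcond]
        simp
      · have hq0 : q ≠ [] := by subst hq; simp
        have hm : 0 < q.length := List.length_pos_iff.mpr hq0
        have hb' : p.getD (p.length - 1) false = false ∨ q.getD 0 false = false := by
          rcases hb with h | h
          · exact Or.inl h
          · right
            rw [List.getD_append _ _ _ _ hm] at h
            exact h
        rw [ih hb', runStartsISL_snoc]
        have hL : (p ++ q).length = p.length + q.length := by simp
        have hd : (p ++ q).getD ((p ++ q).length - 1) false = q.getD (q.length - 1) false := by
          rw [hL, List.getD_append_right _ _ _ _ (by omega)]
          congr 1
          omega
        have hlast :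
            (runStartsISL p ++ (runStartsISL q).map (· + p.length)).getLastD 0 =
              (runStartsISL q).getLastD 0 + p.length := by
          have hne : (runStartsISL q).map (· + p.length) ≠ [] := by
            have hql := runStartsISL_length q
            intro hc
            rw [List.map_eq_nil_iff] at hc
            rw [hc] at hql
            simp at hql
            omega
          rw [List.getLastD_eq_getLast?, List.getLast?_append_of_ne_nil _ hne,
              List.getLast?_map, List.getLastD_eq_getLast?]
          cases hc : (runStartsISL q).getLast? with
          | none =>
              exfalso
              rw [List.getLast?_eq_none_iff, ← List.length_eq_zero_iff, runStartsISL_length] at hc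
              omega
          | some v => simp
        rw [hd, hL, hlast]
        have hc2 : (decide (0 < p.length + q.length)) = true := by simp; omega
        have hc3 : (decide (0 < q.length)) = true := by simp [hm]
        rw [hc2, hc3]
        cases b <;> cases hq2 : q.getD (q.length - 1) false <;>
          simp [List.map_append, Nat.add_comm]
  
theorem runStartsISL_allTrue (ind : List Bool) (h : ∀ x ∈ ind, x = true) :
    runStartsISL ind = List.replicate ind.length 0 := by
  induction ind using List.reverseRecOn with
  | nil => simp [runStartsISL]
  | append_singleton l b ih =>
      have hb : b = true := h b (by simp)
      have hl : ∀ x ∈ l, x = true := fun x hx => h x (by simp [hx])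
      rw [runStartsISL_snoc, ih hl, hb]
      by_cases hn : 0 < l.length
      · have hd : l.getD (l.length - 1) false = true := by
          rw [List.getD_eq_getElem _ _ (by omega)]
          exact hl _ (List.getElem_mem _)
        have hL : (List.replicate l.length (0:Nat)).getLastD 0 = 0 := by
          rw [getLastD_eq_getD_ISL, List.length_replicate,
              List.getD_replicate _ (by omega)]
        rw [hd, hL]
        simp [hn, ← List.replicate_succ']
      · have h0 : l.length = 0 := by omega
        simp [h0]

theorem runStartsISL_allFalse (ind : List Bool) (h : ∀ x ∈ ind, x = false) :
    runStartsISL ind = List.range ind.length := by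
  induction ind using List.reverseRecOn with
  | nil => simp [runStartsISL]
  | append_singleton l b ih =>
      have hb : b = false := h b (by simp)
      have hl : ∀ x ∈ l, x = false := fun x hx => h x (by simp [hx])
      rw [runStartsISL_snoc, ih hl, hb]
      simp [← List.range_succ]


-- ---- B-side: alt splits over boundary, and on homogeneous runs ----
def keyISL (l : String) : Bool := PySem.Str.startswith l "  "

theorem getD_rev_zero_ISL {α : Type} (l : List α) (d : α) :
    l.reverse.getD 0 d = l.getD (l.length - 1) d := by
  rcases List.eq_nil_or_concat' l with rfl | ⟨l', a, rfl⟩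
  · simp
  · have h0 : 0 < l'.length + 1 := by omega
    rw [List.getD_eq_getElem _ _ (by simp), List.getElem_reverse,
        List.getD_eq_getElem _ _ (by simp)]
    simp

theorem getD_rev_last_ISL {α : Type} (l : List α) (d : α) :
    l.reverse.getD (l.length - 1) d = l.getD 0 d := by
  have := getD_rev_zero_ISL l.reverse d
  rw [List.reverse_reverse, List.length_reverse] at this
  exact this.symm

theorem alt_append (p q : List String)
    (hb : (p.map keyISL).getD (p.length - 1) false = false ∨ (q.map keyISL).getD 0 false = false) :
    invert_stack_lines_alt (p ++ q) = invert_stack_lines_alt p ++ invert_stack_lines_alt q := by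
  simp only [invert_stack_lines_alt]
  have hb1 : (p.map (fun l => PySem.Str.startswith l "  ")).getD
        ((p.map (fun l => PySem.Str.startswith l "  ")).length - 1) false = false ∨
      (q.map (fun l => PySem.Str.startswith l "  ")).getD 0 false = false := by
    simpa using hb
  have hb2 : ((q.map (fun l => PySem.Str.startswith l "  ")).reverse).getD
        (((q.map (fun l => PySem.Str.startswith l "  ")).reverse).length - 1) false = false ∨
      ((p.map (fun l => PySem.Str.startswith l "  ")).reverse).getD 0 false = false := by
    rcases hb1 with h | h
    · right
      rw [getD_rev_zero_ISL]
      simpa using h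
    · left
      rw [List.length_reverse, getD_rev_last_ISL]
      exact h
  rw [List.map_append, runStartsISL_append _ _ hb1, List.reverse_append,
      runStartsISL_append _ _ hb2]
  have hsp : (runStartsISL (p.map (fun l => PySem.Str.startswith l "  "))).length = p.length := by
    rw [runStartsISL_length]; simp
  have hsq : (runStartsISL (q.map (fun l => PySem.Str.startswith l "  "))).length = q.length := by
    rw [runStartsISL_length]; simp
  have hrp : (runStartsISL ((p.map (fun l => PySem.Str.startswith l "  ")).reverse)).length = p.length := by
    rw [runStartsISL_length]; simp
  have hrq : (runStartsISL ((q.map (fun l => PySem.Str.startswith l "  ")).reverse)).length = q.length := by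
    rw [runStartsISL_length]; simp
  rw [show (p ++ q).length = p.length + q.length by simp, List.range_add, List.map_append,
      List.map_map]
  congr 1
  · apply List.map_congr_left
    intro i hi
    have hi' : i < p.length := List.mem_range.mp hi
    have hs_le := runStartsISL_getD_le (p.map (fun l => PySem.Str.startswith l "  ")) i
    have hr_le := runStartsISL_getD_le
      ((p.map (fun l => PySem.Str.startswith l "  ")).reverse) (p.length - 1 - i)
    rw [List.getD_append (runStartsISL (p.map (fun l => PySem.Str.startswith l "  "))) ((runStartsISL (q.map (fun l => PySem.Str.startswith l "  "))).map (· + (p.map (fun l => PySem.Str.startswith l "  ")).length)) 0 i (by rw [hsp]; omega)]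
    rw [List.getD_append_right (runStartsISL (q.map (fun l => PySem.Str.startswith l "  ")).reverse) ((runStartsISL (p.map (fun l => PySem.Str.startswith l "  ")).reverse).map (· + (q.map (fun l => PySem.Str.startswith l "  ")).reverse.length)) 0 (p.length + q.length - 1 - i) (by rw [hrq]; omega)]
    rw [hrq, show p.length + q.length - 1 - i - q.length = p.length - 1 - i by omega]
    have hrmap :
        ((runStartsISL ((p.map (fun l => PySem.Str.startswith l "  ")).reverse)).map
            (· + (q.map (fun l => PySem.Str.startswith l "  ")).reverse.length)).getD
          (p.length - 1 - i) 0 =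
        (runStartsISL ((p.map (fun l => PySem.Str.startswith l "  ")).reverse)).getD
          (p.length - 1 - i) 0 + q.length := by
      rw [List.getD_eq_getElem _ _ (by rw [List.length_map, hrp]; omega), List.getElem_map,
          List.getD_eq_getElem _ _ (by omega)]
      simp
    rw [hrmap]
    have harith :
        (runStartsISL (p.map (fun l => PySem.Str.startswith l "  "))).getD i 0 +
            (p.length + q.length - 1 -
              ((runStartsISL ((p.map (fun l => PySem.Str.startswith l "  ")).reverse)).getD
                (p.length - 1 - i) 0 + q.length)) - i =
        (runStartsISL (p.map (fun l => PySem.Str.startswith l "  "))).getD i 0 +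
            (p.length - 1 -
              (runStartsISL ((p.map (fun l => PySem.Str.startswith l "  ")).reverse)).getD
                (p.length - 1 - i) 0) - i := by
      omega
    rw [harith]
    rw [List.getD_append p q "" _ (by omega)]
  · apply List.map_congr_left
    intro j hj
    simp only [Function.comp_apply]
    have hj' : j < q.length := List.mem_range.mp hj
    have hs_le := runStartsISL_getD_le (q.map (fun l => PySem.Str.startswith l "  ")) j
    have hr_le := runStartsISL_getD_le
      ((q.map (fun l => PySem.Str.startswith l "  ")).reverse) (q.length - 1 - j)
    rw [List.getD_append_right (runStartsISL (p.map (fun l => PySem.Str.startswith l "  "))) ((runStartsISL (q.map (fun l => PySem.Str.startswith l "  "))).map (· + (p.map (fun l => PySem.Str.startswith l "  ")).length)) 0 (p.length + j) (by rw [hsp]; omega)]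
    have hsmap :
        ((runStartsISL (q.map (fun l => PySem.Str.startswith l "  "))).map
            (· + (p.map (fun l => PySem.Str.startswith l "  ")).length)).getD
          (p.length + j - (runStartsISL (p.map (fun l => PySem.Str.startswith l "  "))).length) 0 =
        (runStartsISL (q.map (fun l => PySem.Str.startswith l "  "))).getD j 0 + p.length := by
      rw [hsp, show p.length + j - p.length = j by omega,
          List.getD_eq_getElem _ _ (by rw [List.length_map, hsq]; omega), List.getElem_map,
          List.getD_eq_getElem _ _ (by omega)]
      simp
    rw [hsmap]
    rw [show p.length + q.length - 1 - (p.length + j) = q.length - 1 - j by omega]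
    rw [List.getD_append (runStartsISL (q.map (fun l => PySem.Str.startswith l "  ")).reverse) ((runStartsISL (p.map (fun l => PySem.Str.startswith l "  ")).reverse).map (· + (q.map (fun l => PySem.Str.startswith l "  ")).reverse.length)) 0 (q.length - 1 - j) (by rw [hrq]; omega)]
    have harith :
        (runStartsISL (q.map (fun l => PySem.Str.startswith l "  "))).getD j 0 + p.length +
            (p.length + q.length - 1 -
              (runStartsISL ((q.map (fun l => PySem.Str.startswith l "  ")).reverse)).getD
                (q.length - 1 - j) 0) - (p.length + j) =
        p.length +
          ((runStartsISL (q.map (fun l => PySem.Str.startswith l "  "))).getD j 0 +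
            (q.length - 1 -
              (runStartsISL ((q.map (fun l => PySem.Str.startswith l "  ")).reverse)).getD
                (q.length - 1 - j) 0) - j) := by
      omega
    rw [harith]
    rw [List.getD_append_right p q "" _ (by omega),
        show p.length +
          ((runStartsISL (q.map (fun l => PySem.Str.startswith l "  "))).getD j 0 +
            (q.length - 1 -
              (runStartsISL ((q.map (fun l => PySem.Str.startswith l "  ")).reverse)).getD
                (q.length - 1 - j) 0) - j) - p.length =
          (runStartsISL (q.map (fun l => PySem.Str.startswith l "  "))).getD j 0 +
            (q.length - 1 -
              (runStartsISL ((q.map (fun l => PySem.Str.startswith l "  ")).reverse)).getD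
                (q.length - 1 - j) 0) - j by omega]

theorem alt_allTrue (g : List String) (h : ∀ x ∈ g, keyISL x = true) :
    invert_stack_lines_alt g = g.reverse := by
  simp only [invert_stack_lines_alt]
  have hall : ∀ x ∈ g.map (fun l => PySem.Str.startswith l "  "), x = true := by
    intro x hx
    rcases List.mem_map.mp hx with ⟨y, hy, rfl⟩
    exact h y hy
  have hrev : ∀ x ∈ (g.map (fun l => PySem.Str.startswith l "  ")).reverse, x = true :=
    fun x hx => hall x (List.mem_reverse.mp hx)
  rw [runStartsISL_allTrue _ hall, runStartsISL_allTrue _ hrev]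
  simp only [List.length_map, List.length_reverse]
  apply List.ext_getElem (by simp)
  intro i h1 h2
  have hi : i < g.length := by simpa using h1
  simp only [List.getElem_map, List.getElem_range]
  rw [List.getD_replicate _ (by omega), List.getD_replicate _ (by omega)]
  rw [List.getElem_reverse]
  have hidx : 0 + (g.length - 1 - 0) - i = g.length - 1 - i := by omega
  rw [hidx, List.getD_eq_getElem _ _ (by omega)]

theorem alt_allFalse (g : List String) (h : ∀ x ∈ g, keyISL x = false) :
    invert_stack_lines_alt g = g := by
  simp only [invert_stack_lines_alt]
  have hall : ∀ x ∈ g.map (fun l => PySem.Str.startswith l "  "), x = false := by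
    intro x hx
    rcases List.mem_map.mp hx with ⟨y, hy, rfl⟩
    exact h y hy
  have hrev : ∀ x ∈ (g.map (fun l => PySem.Str.startswith l "  ")).reverse, x = false :=
    fun x hx => hall x (List.mem_reverse.mp hx)
  rw [runStartsISL_allFalse _ hall, runStartsISL_allFalse _ hrev]
  simp only [List.length_map, List.length_reverse]
  apply List.ext_getElem (by simp)
  intro i h1 h2
  have hi : i < g.length := by simpa using h1
  simp only [List.getElem_map, List.getElem_range]
  rw [List.getD_eq_getElem (List.range g.length) 0 (by simpa using hi), List.getElem_range,
      List.getD_eq_getElem (List.range g.length) 0 (by simp; omega), List.getElem_range]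
  have hidx : i + (g.length - 1 - (g.length - 1 - i)) - i = i := by omega
  rw [hidx, List.getD_eq_getElem _ _ hi]

theorem takeRunISL_append (k : Bool) (ls : List String) :
    (takeRunISL k ls).1 ++ (takeRunISL k ls).2 = ls := by
  induction ls with
  | nil => simp [takeRunISL]
  | cons l rest ih =>
      simp only [takeRunISL]
      split
      · simpa using ih
      · simp

theorem takeRunISL_mem (k : Bool) (ls : List String) :
    ∀ x ∈ (takeRunISL k ls).1, keyISL x = k := by
  induction ls with
  | nil => simp [takeRunISL]
  | cons l rest ih =>
      simp only [takeRunISL]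
      split
      · rename_i hk
        intro x hx
        rcases List.mem_cons.mp hx with h | h
        · subst h; exact hk
        · exact ih x h
      · simp

theorem takeRunISL_head (k : Bool) (ls : List String) :
    (takeRunISL k ls).2 = [] ∨
      ((takeRunISL k ls).2.map keyISL).getD 0 false = !k := by
  induction ls with
  | nil => simp [takeRunISL]
  | cons l rest ih =>
      simp only [takeRunISL]
      split
      · exact ih
      · rename_i hk
        right
        simp only [List.map_cons, List.getD_cons_zero]
        cases k <;> simp_all [keyISL]

theorem alt_eq_runs (n : Nat) : ∀ ls : List String, ls.length ≤ n →
    invert_stack_lines_alt ls =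
      (groupRunsISL ls).flatMap (fun g => if g.1 then g.2.reverse else g.2) := by
  induction n with
  | zero =>
      intro ls h
      have hnil : ls = [] := List.eq_nil_of_length_eq_zero (Nat.le_zero.mp h)
      simp [hnil, invert_stack_lines_alt, groupRunsISL, runStartsISL]
  | succ n ih =>
      intro ls h
      cases ls with
      | nil => simp [invert_stack_lines_alt, groupRunsISL, runStartsISL]
      | cons l rest =>
          simp only [List.length_cons, Nat.succ_le_succ_iff] at h
          have hg : groupRunsISL (l :: rest) =
              (keyISL l, l :: (takeRunISL (keyISL l) rest).1) ::
                groupRunsISL (takeRunISL (keyISL l) rest).2 := by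
            simp [groupRunsISL, keyISL]
          have hdecomp : l :: rest =
              (l :: (takeRunISL (keyISL l) rest).1) ++ (takeRunISL (keyISL l) rest).2 := by
            rw [List.cons_append, takeRunISL_append]
          have hmem : ∀ x ∈ l :: (takeRunISL (keyISL l) rest).1, keyISL x = keyISL l := by
            intro x hx
            rcases List.mem_cons.mp hx with rfl | hx
            · rfl
            · exact takeRunISL_mem _ _ x hx
          have hbnd : ((l :: (takeRunISL (keyISL l) rest).1).map keyISL).getD
                ((l :: (takeRunISL (keyISL l) rest).1).length - 1) false = false ∨
              (((takeRunISL (keyISL l) rest).2).map keyISL).getD 0 false = false := by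
            by_cases hk : keyISL l = true
            · right
              rcases takeRunISL_head (keyISL l) rest with h2 | h2
              · rw [h2]; simp
              · rw [h2, hk]
                simp
            · left
              rw [Bool.not_eq_true] at hk
              rw [List.getD_eq_getElem _ _ (by simp), List.getElem_map]
              rw [hmem _ (List.getElem_mem _), hk]
          rw [hg, List.flatMap_cons]
          conv_lhs => rw [hdecomp]
          rw [alt_append _ _ hbnd]
          congr 1
          · by_cases hk : keyISL l = true
            · rw [if_pos hk]
              exact alt_allTrue _ (fun x hx => (hmem x hx).trans hk)
            · rw [Bool.not_eq_true] at hk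
              rw [if_neg (by simp [hk])]
              exact alt_allFalse _ (fun x hx => (hmem x hx).trans hk)
          · exact ih _ (le_trans (takeRunISL_snd_len _ _) h)

-- ===== VERDICT (by name: the statement is the Claim_ definition above) =====
theorem invert_stack_lines_spec : Claim_equal_invert_stack_lines := by
  intro lines _
  unfold Spec_invert_stack_lines invert_stack_lines
  rw [invASLoop_eq_runs lines.length lines le_rfl,
      alt_eq_runs lines.length lines le_rfl]
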